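-- pv_equiv track=rewrite | github.com/ddu0422/study | algorithm/baekjoon/greedy/silver5/27940.py | solution
-- ===== SOURCE A (Python) =====
-- def solution(rains, k):
--     answer = 0
--     floor = 100001
--
--     for index, value in enumerate(rains):
--         t, r = value
--         answer += r
--         floor = min(floor, t)
--         if answer > k:
--             return [index + 1, floor]
--
--     return [-1]
-- ===== SOURCE B (Python) =====
-- def solution(rains, k):
--     # build prefix-sum table of rain amounts, then scan it
--     prefix = []
--     s = 0
--     for _, r in rains:
--         s += r
--         prefix.append(s)
--     for i, s in enumerate(prefix):
--         if s > k:
--             return [i + 1, min([100001] + [t for t, _ in rains[:i + 1]])]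
--     return [-1]
-- ===== Notes on version B (the rewrite author's own statement) =====
-- stated objective: alternative
-- what changed: A fuses sum, running min and the threshold test into one loop; B first builds the prefix-sum table, scans it for the first value exceeding k, and only then computes the clamped minimum of t over the matched prefix in a separate pass.
import Mathlib
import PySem

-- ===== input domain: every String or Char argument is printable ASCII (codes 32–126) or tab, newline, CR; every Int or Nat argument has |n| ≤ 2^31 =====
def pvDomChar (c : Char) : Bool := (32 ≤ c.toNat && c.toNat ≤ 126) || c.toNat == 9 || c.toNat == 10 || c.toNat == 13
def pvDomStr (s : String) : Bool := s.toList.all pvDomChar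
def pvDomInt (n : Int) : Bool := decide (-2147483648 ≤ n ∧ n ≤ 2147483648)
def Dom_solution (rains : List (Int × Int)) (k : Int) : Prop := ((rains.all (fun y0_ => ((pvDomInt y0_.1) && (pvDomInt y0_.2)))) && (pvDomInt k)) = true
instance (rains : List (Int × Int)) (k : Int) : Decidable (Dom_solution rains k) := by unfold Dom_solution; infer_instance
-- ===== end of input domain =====

-- B builds the prefix-sum table first, then scans it and computes the clamped min in a
-- separate pass; A fuses everything into one accumulator loop. Same values, alternative structure.

-- ===== PORT A =====
-- the fused loop of A: state (answer, floor, index)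
def solLoopA (k : Int) : List (Int × Int) → Int → Int → Int → List Int
  | [], _, _, _ => [-1]
  | (t, r) :: rest, answer, floor, index =>
    let answer' := answer + r
    let floor' := min floor t
    if answer' > k then [index + 1, floor'] else solLoopA k rest answer' floor' (index + 1)

def solution (rains : List (Int × Int)) (k : Int) : List Int :=
  solLoopA k rains 0 100001 0

-- ===== PORT B =====
-- first pass: prefix sums of the rain amounts (running accumulator s)
def prefixSums (s : Int) : List (Int × Int) → List Int
  | [] => []
  | (_, r) :: rest => (s + r) :: prefixSums (s + r) rest

-- second pass: first position in the table whose value exceeds k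
def scanB (k : Int) : List Int → Option Nat
  | [] => none
  | s :: rest => if s > k then some 0 else (scanB k rest).map (· + 1)

def solution_alt (rains : List (Int × Int)) (k : Int) : List Int :=
  match scanB k (prefixSums 0 rains) with
  | none => [-1]
  | some i =>
      [Int.ofNat i + 1, (((rains.take (i + 1)).map Prod.fst)).foldl min 100001]

-- ===== PRECONDITION & SPEC =====
def Spec_solution (rains : List (Int × Int)) (k : Int) (out : List Int) : Prop := out = solution_alt rains k
instance (rains : List (Int × Int)) (k : Int) (out : List Int) : Decidable (Spec_solution rains k out) := by unfold Spec_solution; infer_instance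

-- ===== CLAIM (what is proved, stated in full; the proofs are below) =====
def Claim_equal_solution : Prop := ∀ (rains : List (Int × Int)) (k : Int), Dom_solution rains k → Spec_solution rains k (solution rains k)

-- ===== LEMMAS AND PROOFS =====

-- the fused loop equals: scan the prefix-sum table, then fold min over the matched prefix
theorem solLoopA_eq (k : Int) (rains : List (Int × Int)) :
    ∀ (a floor idx : Int),
      solLoopA k rains a floor idx =
        match scanB k (prefixSums a rains) with
        | none => [-1]
        | some j => [idx + Int.ofNat j + 1,
            (((rains.take (j + 1)).map Prod.fst)).foldl min floor] := by
  induction rains with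
  | nil => intro a floor idx; simp [solLoopA, prefixSums, scanB]
  | cons p rest ih =>
    intro a floor idx
    obtain ⟨t, r⟩ := p
    simp only [solLoopA, prefixSums, scanB]
    by_cases h : a + r > k
    · simp [h, List.take, List.foldl]
    · simp only [h, if_neg, if_false]
      rw [ih (a + r) (min floor t) (idx + 1)]
      cases hs : scanB k (prefixSums (a + r) rest) with
      | none => simp
      | some j =>
        simp only [Option.map_some]
        have h1 : idx + 1 + Int.ofNat j = idx + Int.ofNat (j + 1) := by
          simp only [Int.ofNat_eq_natCast]; push_cast; ring
        rw [h1]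
        simp [List.take_succ_cons, List.foldl]

-- ===== VERDICT (by name: the statement is the Claim_ definition above) =====
theorem solution_spec : Claim_equal_solution := by
  intro rains k _
  unfold Spec_solution solution solution_alt
  rw [solLoopA_eq]
  cases scanB k (prefixSums 0 rains) <;> simp
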